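-- pv_equiv track=rewrite | github.com/takekoputa/project-euler | 5th_100/problem458.py | generate_next_states
-- ===== SOURCE A (Python) =====
-- from collections import defaultdict
--
-- N = 7
--
-- L = N - 1
--
-- def encode(permutation):
--     alphabet_map = [-1] * N
--     next_alphabet = 0
--     for i in range(L):
--         if alphabet_map[permutation[i]] < 0:
--             alphabet_map[permutation[i]] = next_alphabet
--             next_alphabet += 1
--     _hash = 0
--     msb_index = 0
--     for n in permutation:
--         _hash = _hash | (alphabet_map[n] << msb_index)
--         msb_index += 3
--     return _hash
--
-- def decode(_hash):
--     ans = [0] * L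
--     msb_index = 0;
--     for i in range(L):
--         ans[i] = _hash & 0x7
--         _hash >>= 3
--     return ans
--
-- def generate_next_states(_hash):
--     original_permutation = decode(_hash)
--     n_digit_types = len(set(original_permutation))
--
--     next_permutation = decode(_hash>>3)
--     next_states = defaultdict(lambda: 0)
--     for next_digit in range(N):
--         if n_digit_types == N - 1 and not next_digit in original_permutation: #invalid, a permutation of project
--             continue
--         next_permutation[-1] = next_digit
--         next_state = encode(next_permutation)
--         next_states[next_state] += 1
--     return next_states
-- ===== SOURCE B (Python) =====
-- N = 7
--
-- L = N - 1
--
-- def generate_next_states(_hash):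
--     # Canonicalize the fixed prefix once instead of re-encoding per candidate digit.
--     chunks = [(_hash >> (3 * i)) & 7 for i in range(N)]
--     original = chunks[:L]
--     n_digit_types = len(set(original))
--     prefix = chunks[1:L]
--     alphabet_map = {}
--     for v in prefix:
--         if v not in alphabet_map:
--             alphabet_map[v] = len(alphabet_map)
--     base = 0
--     for i, v in enumerate(prefix):
--         base |= alphabet_map[v] << (3 * i)
--     n_labels = len(alphabet_map)
--     next_states = {}
--     for next_digit in range(N):
--         if n_digit_types == N - 1 and next_digit not in original:
--             continue
--         h = base | (alphabet_map.get(next_digit, n_labels) << (3 * (L - 1)))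
--         next_states[h] = next_states.get(h, 0) + 1
--     return next_states
-- ===== Notes on version B (the rewrite author's own statement) =====
-- stated objective: alternative
-- what changed: B decodes the hash into its 3-bit chunks directly and canonicalizes the fixed 5-digit prefix once (first-occurrence alphabet map plus prefix OR-hash), then for each candidate last digit just ORs in that digit's existing-or-next label, instead of A's per-candidate mutate-and-re-encode which rebuilds the alphabet map and the full hash 7 times.
-- outside the precondition, e.g. on generate_next_states(56): A raises IndexError, B returns {37448: 1, 70216: 6}
import Mathlib
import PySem

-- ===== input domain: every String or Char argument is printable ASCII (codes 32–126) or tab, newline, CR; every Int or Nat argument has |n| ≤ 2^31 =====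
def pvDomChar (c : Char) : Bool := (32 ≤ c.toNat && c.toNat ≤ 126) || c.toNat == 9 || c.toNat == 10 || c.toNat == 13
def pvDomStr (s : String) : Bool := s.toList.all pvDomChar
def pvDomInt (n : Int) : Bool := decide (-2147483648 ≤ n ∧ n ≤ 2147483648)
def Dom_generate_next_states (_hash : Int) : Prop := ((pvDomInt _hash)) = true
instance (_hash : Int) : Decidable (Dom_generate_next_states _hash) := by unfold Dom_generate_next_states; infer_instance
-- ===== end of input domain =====

-- B canonicalizes the fixed 5-digit prefix once (alphabet map + prefix hash) and ORs in each
-- candidate last digit's label, instead of re-running decode/encode per candidate (objective: alternative).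

-- ===== PORT A =====
def pvA_N : Int := 7
def pvA_L : Int := pvA_N - 1

def decode (_hash : Int) : List Int :=
  (((PySem.List.pyRange 0 pvA_L 1).foldl
    (fun (st : List Int × Int) i => (st.1.set i.toNat (PySem.Int.band st.2 0x7), st.2 >>> (3 : Int)))
    (List.replicate pvA_L.toNat 0, _hash))).1

def encode (permutation : List Int) : Int :=
  let st := (PySem.List.pyRange 0 pvA_L 1).foldl
    (fun (st : List Int × Int) i =>
      let p := PySem.List.pyGetD permutation i 0
      if PySem.List.pyGetD st.1 p 0 < 0 then
        (st.1.set p.toNat st.2, st.2 + 1)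
      else st)
    (List.replicate pvA_N.toNat (-1), 0)
  (permutation.foldl
    (fun (acc : Int × Int) n =>
      (PySem.Int.bor acc.1 (PySem.List.pyGetD st.1 n 0 <<< acc.2), acc.2 + 3))
    ((0 : Int), (0 : Int))).1


def generate_next_states (_hash : Int) : List (Int × Int) :=
  let original_permutation := decode _hash
  let n_digit_types : Int := ((PySem.Set.ofList original_permutation).length : Int)
  let next_permutation := decode (_hash >>> (3 : Int))
  (((PySem.List.pyRange 0 pvA_N 1).foldl
    (fun (st : List Int × PySem.Dict Int Int) next_digit =>
      if n_digit_types = pvA_N - 1 ∧ ¬ next_digit ∈ original_permutation then st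
      else
        (st.1.set (st.1.length - 1) next_digit,
         st.2.modify (encode (st.1.set (st.1.length - 1) next_digit)) 0 (· + 1)))
    (next_permutation, PySem.Dict.empty))).2.items


-- ===== PORT B =====
def pvB_N : Int := 7
def pvB_L : Int := pvB_N - 1

def generate_next_states_alt (_hash : Int) : List (Int × Int) :=
  let chunks := (PySem.List.pyRange 0 pvB_N 1).map
    (fun i => PySem.Int.band (_hash >>> (3 * i)) 7)
  let original := PySem.List.slice chunks none (some pvB_L)
  let n_digit_types : Int := ((PySem.Set.ofList original).length : Int)
  let pfx := PySem.List.slice chunks (some 1) (some pvB_L)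
  let alphabet_map := pfx.foldl
    (fun (m : PySem.Dict Int Int) v =>
      if !m.contains v then m.insert v (m.size : Int) else m)
    PySem.Dict.empty
  let base := (PySem.List.enumerate pfx).foldl
    (fun (b : Int) p => PySem.Int.bor b (alphabet_map.getD p.2 0 <<< (3 * p.1))) 0
  let n_labels : Int := (alphabet_map.size : Int)
  ((PySem.List.pyRange 0 pvB_N 1).foldl
    (fun (ns : PySem.Dict Int Int) next_digit =>
      if n_digit_types = pvB_N - 1 ∧ ¬ next_digit ∈ original then ns
      else
        ns.insert (PySem.Int.bor base (alphabet_map.getD next_digit n_labels <<< (3 * (pvB_L - 1))))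
          (ns.getD (PySem.Int.bor base (alphabet_map.getD next_digit n_labels <<< (3 * (pvB_L - 1)))) 0 + 1))
    PySem.Dict.empty).items


-- ===== PRECONDITION & SPEC =====
-- Pre_ excludes exactly the inputs on which A raises IndexError: encode indexes
-- alphabet_map[7] whenever one of the 3-bit chunks 1..5 of _hash equals 7.
def Pre_generate_next_states (_hash : Int) : Prop :=
  PySem.Int.band (_hash >>> (3:Int)) 7 ≠ 7 ∧ PySem.Int.band (_hash >>> (6:Int)) 7 ≠ 7 ∧
  PySem.Int.band (_hash >>> (9:Int)) 7 ≠ 7 ∧ PySem.Int.band (_hash >>> (12:Int)) 7 ≠ 7 ∧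
  PySem.Int.band (_hash >>> (15:Int)) 7 ≠ 7
instance (_hash : Int) : Decidable (Pre_generate_next_states _hash) := by
  unfold Pre_generate_next_states; infer_instance

def pvWitness_generate_next_states : Int := 0

def Spec_generate_next_states (_hash : Int) (out : List (Int × Int)) : Prop := out = generate_next_states_alt _hash
instance (_hash : Int) (out : List (Int × Int)) : Decidable (Spec_generate_next_states _hash out) := by unfold Spec_generate_next_states; infer_instance

-- ===== CLAIM (what is proved, stated in full; the proofs are below) =====
def Claim_equal_generate_next_states : Prop := ∀ (_hash : Int), Dom_generate_next_states _hash → Pre_generate_next_states _hash → Spec_generate_next_states _hash (generate_next_states _hash)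

-- ===== LEMMAS AND PROOFS =====
-- helpers
def stepA (st : List Int × Int) (v : Int) : List Int × Int :=
  if PySem.List.pyGetD st.1 v 0 < 0 then (st.1.set v.toNat st.2, st.2 + 1) else st

def stepB (m : PySem.Dict Int Int) (v : Int) : PySem.Dict Int Int :=
  if !m.contains v then m.insert v (m.size : Int) else m

def amAf (p : List Int) : List Int × Int := p.foldl stepA (List.replicate 7 (-1), 0)
def amBf (p : List Int) : PySem.Dict Int Int := p.foldl stepB PySem.Dict.empty

def PRel (st : List Int × Int) (m : PySem.Dict Int Int) : Prop :=
  st.1.length = 7 ∧ st.2 = (m.size : Int) ∧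
  (∀ v : Int, 0 ≤ v → v < 7 → PySem.List.pyGetD st.1 v 0 = m.getD v (-1)) ∧
  (∀ v : Int, m.contains v = true → 0 ≤ m.getD v (-1))

lemma pyGetD_set (l : List Int) (j : Nat) (x v : Int) (hv : 0 ≤ v) (hvl : v < (l.length : Int))
    (_hj : j < l.length) :
    PySem.List.pyGetD (l.set j x) v 0 = if v.toNat = j then x else PySem.List.pyGetD l v 0 := by
  rw [PySem.List.pyGetD_eq_getElem (h0 := hv) (h1 := by simpa using hvl),
      List.getElem_set]
  split_ifs with h1 h2 h2
  · rfl
  · omega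
  · omega
  · rw [PySem.List.pyGetD_eq_getElem (h0 := hv) (h1 := hvl)]

lemma getD_irrel (m : PySem.Dict Int Int) (k : Int) (hc : m.contains k = true) (d1 d2 : Int) :
    m.getD k d1 = m.getD k d2 := by
  rw [PySem.Dict.contains_eq_isSome_get?] at hc
  rcases ho : m.get? k with _ | w
  · rw [ho] at hc; simp at hc
  · rw [PySem.Dict.getD_eq_get?_getD, PySem.Dict.getD_eq_get?_getD, ho]; rfl

lemma rel_step (st : List Int × Int) (m : PySem.Dict Int Int) (v : Int)
    (hv : 0 ≤ v ∧ v < 7) (hrel : PRel st m) : PRel (stepA st v) (stepB m v) := by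
  obtain ⟨hlen, hsz, hget, hpos⟩ := hrel
  by_cases hc : m.contains v = true
  · have hge : 0 ≤ PySem.List.pyGetD st.1 v 0 := by
      rw [hget v hv.1 hv.2]; exact hpos v hc
    unfold stepA stepB
    rw [if_neg (by omega), if_neg (by simp [hc])]
    exact ⟨hlen, hsz, hget, hpos⟩
  · have hcf : m.contains v = false := by simpa using hc
    have hlt : PySem.List.pyGetD st.1 v 0 < 0 := by
      rw [hget v hv.1 hv.2, PySem.Dict.getD_of_not_contains _ _ hcf]; norm_num
    unfold stepA stepB
    rw [if_pos hlt, if_pos (by simp [hcf])]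
    refine ⟨by simpa using hlen, ?_, ?_, ?_⟩
    · rw [PySem.Dict.size_insert]; rw [hcf]; push_cast; omega
    · intro w hw0 hw7
      rw [pyGetD_set st.1 v.toNat st.2 w hw0 (by omega) (by omega),
          PySem.Dict.getD_insert]
      split_ifs with h1 h2 h2
      · exact hsz
      · omega
      · omega
      · exact hget w hw0 hw7
    · intro w hw
      rw [PySem.Dict.getD_insert]
      split_ifs with h1
      · positivity
      · rw [PySem.Dict.contains_insert] at hw
        simp [show ¬ (w = v) from h1] at hw
        exact hpos w hw

lemma rel_fold (p : List Int) (hp : ∀ v ∈ p, 0 ≤ v ∧ v < 7) :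
    ∀ (st : List Int × Int) (m : PySem.Dict Int Int), PRel st m →
      PRel (p.foldl stepA st) (p.foldl stepB m) := by
  induction p with
  | nil => intro st m h; exact h
  | cons a t ih =>
    intro st m h
    exact ih (fun v hv => hp v (List.mem_cons_of_mem a hv)) _ _
      (rel_step st m a (hp a List.mem_cons_self) h)

lemma rel_init : PRel (List.replicate 7 (-1), 0) PySem.Dict.empty := by
  refine ⟨by simp, by simp [PySem.Dict.size_empty], ?_, ?_⟩
  · intro v h0 h7
    rw [show ((List.replicate 7 (-1 : Int), (0 : Int))).1 = List.replicate 7 (-1) from rfl,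
        PySem.List.pyGetD_of_nonneg _ _ h0, List.getD_replicate _ (by omega : v.toNat < 7)]
    simp [PySem.Dict.getD_empty]
  · intro v hv; rw [PySem.Dict.contains_empty] at hv; simp at hv

lemma rel_amf (p : List Int) (hp : ∀ v ∈ p, 0 ≤ v ∧ v < 7) : PRel (amAf p) (amBf p) :=
  rel_fold p hp _ _ rel_init

lemma contains_stepB_mono (m : PySem.Dict Int Int) (v w : Int) (h : m.contains w = true) :
    (stepB m v).contains w = true := by
  unfold stepB
  split_ifs with h1
  · rw [PySem.Dict.contains_insert]; simp [h]
  · exact h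

lemma contains_fold_mono (p : List Int) :
    ∀ (m : PySem.Dict Int Int) (w : Int), m.contains w = true →
      (p.foldl stepB m).contains w = true := by
  induction p with
  | nil => intro m w h; exact h
  | cons a t ih => intro m w h; exact ih _ w (contains_stepB_mono m a w h)

lemma contains_amBf_of_mem (p : List Int) (v : Int) (h : v ∈ p) :
    ∀ (m : PySem.Dict Int Int), (p.foldl stepB m).contains v = true := by
  induction p with
  | nil => simp at h
  | cons a t ih =>
    intro m
    rcases List.mem_cons.mp h with rfl | hmem
    · have h1 : (stepB m v).contains v = true := by
        unfold stepB
        split_ifs with hb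
        · exact PySem.Dict.contains_insert_self _ _ _
        · simpa using hb
      exact contains_fold_mono t (stepB m v) v h1
    · exact ih hmem (stepB m a)

lemma snd_orfold (A : List Int) (xs : List Int) :
    ∀ (b0 m0 : Int),
      (xs.foldl (fun (acc : Int × Int) n =>
        (PySem.Int.bor acc.1 (PySem.List.pyGetD A n 0 <<< acc.2), acc.2 + 3)) (b0, m0)).2
      = m0 + 3 * xs.length := by
  induction xs with
  | nil => intro b0 m0; simp
  | cons a t ih =>
    intro b0 m0
    simp only [List.foldl]
    rw [ih]
    simp only [List.length_cons]
    push_cast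
    ring

lemma orfold_enum (f g : Int → Int) (xs : List Int) (hfg : ∀ x ∈ xs, f x = g x) :
    ∀ (s b0 : Int),
      (xs.foldl (fun (acc : Int × Int) n =>
        (PySem.Int.bor acc.1 (f n <<< acc.2), acc.2 + 3)) (b0, 3 * s)).1
      = (PySem.List.enumerate xs s).foldl
          (fun b p => PySem.Int.bor b (g p.2 <<< (3 * p.1))) b0 := by
  induction xs with
  | nil => intro s b0; simp [PySem.List.enumerate_nil]
  | cons a t ih =>
    intro s b0
    rw [PySem.List.enumerate_cons]
    simp only [List.foldl]
    rw [hfg a List.mem_cons_self, show (3 : Int) * s + 3 = 3 * (s + 1) by ring]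
    exact ih (fun x hx => hfg x (List.mem_cons_of_mem a hx)) (s + 1) _

lemma counters_eq (cond : Int → Prop) [DecidablePred cond] (F : Int → Int) (ds : List Int) :
    ds.foldl (fun acc d => if cond d then acc else acc.modify (F d) (0 : Int) (· + 1)) PySem.Dict.empty
    = ds.foldl (fun ns d => if cond d then ns else ns.insert (F d) (ns.getD (F d) (0 : Int) + 1))
        PySem.Dict.empty := by
  have h1 : ∀ (acc : PySem.Dict Int Int), ∀ d ∈ ds,
      (if cond d then acc else acc.modify (F d) (0 : Int) (· + 1))
      = (if ¬ cond d then acc.modify (F d) (0 : Int) (· + 1) else acc) := by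
    intro acc d _; rw [ite_not]
  have h2 : ∀ (ns : PySem.Dict Int Int), ∀ d ∈ ds,
      (if cond d then ns else ns.insert (F d) (ns.getD (F d) (0 : Int) + 1))
      = (if ¬ cond d then ns.insert (F d) (ns.getD (F d) (0 : Int) + 1) else ns) := by
    intro ns d _; rw [ite_not]
  have e1 := PySem.List.foldl_congr_mem ds
    (fun acc d => if cond d then acc else acc.modify (F d) (0 : Int) (· + 1))
    (fun acc d => if ¬ cond d then acc.modify (F d) (0 : Int) (· + 1) else acc) PySem.Dict.empty h1
  have e2 := PySem.List.foldl_congr_mem ds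
    (fun ns d => if cond d then ns else ns.insert (F d) (ns.getD (F d) (0 : Int) + 1))
    (fun ns d => if ¬ cond d then ns.insert (F d) (ns.getD (F d) (0 : Int) + 1) else ns) PySem.Dict.empty h2
  rw [e1, e2,
      PySem.List.foldl_ite_eq_foldl_filter (fun d => ¬ cond d),
      PySem.List.foldl_ite_eq_foldl_filter (fun d => ¬ cond d),
      ← List.foldl_map (f := F) (g := fun (acc : PySem.Dict Int Int) v => acc.modify v (0 : Int) (· + 1)),
      ← List.foldl_map (f := F) (g := fun (ns : PySem.Dict Int Int) v => ns.insert v (ns.getD v (0 : Int) + 1)),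
      ← PySem.Dict.counter_eq_foldl,
      PySem.Dict.foldl_insert_getD_add_one_eq_counter]

lemma loopA (ds : List Int) (cond : Int → Prop) [DecidablePred cond] :
    ∀ (c1 c2 c3 c4 c5 x : Int) (d0 : PySem.Dict Int Int),
      ((ds.foldl (fun (st : List Int × PySem.Dict Int Int) d =>
          if cond d then st
          else (st.1.set (st.1.length - 1) d,
                st.2.modify (encode (st.1.set (st.1.length - 1) d)) 0 (· + 1)))
        ([c1, c2, c3, c4, c5, x], d0))).2
      = ds.foldl (fun acc d =>
          if cond d then acc else acc.modify (encode [c1, c2, c3, c4, c5, d]) 0 (· + 1)) d0 := by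
  induction ds with
  | nil => intro c1 c2 c3 c4 c5 x d0; rfl
  | cons a t ih =>
    intro c1 c2 c3 c4 c5 x d0
    simp only [List.foldl]
    by_cases h : cond a
    · rw [if_pos h, if_pos h]; exact ih c1 c2 c3 c4 c5 x d0
    · rw [if_neg h, if_neg h]
      exact ih c1 c2 c3 c4 c5 a _

lemma encode_structural (a1 a2 a3 a4 a5 a6 : Int) :
    encode [a1, a2, a3, a4, a5, a6]
    = ([a1, a2, a3, a4, a5, a6].foldl
        (fun (acc : Int × Int) n =>
          (PySem.Int.bor acc.1
            (PySem.List.pyGetD (amAf [a1, a2, a3, a4, a5, a6]).1 n 0 <<< acc.2),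
           acc.2 + 3)) ((0 : Int), (0 : Int))).1 := by
  have key := PySem.List.foldl_pyRange_pyGetD [a1, a2, a3, a4, a5, a6] (0 : Int) stepA
    (List.replicate 7 (-1), (0 : Int)) (by norm_num : (0 : Int) ≤ 0)
  calc encode [a1, a2, a3, a4, a5, a6]
      = ([a1, a2, a3, a4, a5, a6].foldl
          (fun (acc : Int × Int) n =>
            (PySem.Int.bor acc.1 (PySem.List.pyGetD
              (List.foldl (fun acc j => stepA acc (PySem.List.pyGetD [a1, a2, a3, a4, a5, a6] j 0))
                (List.replicate 7 (-1), (0 : Int))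
                (PySem.List.pyRange 0 (PySem.List.len [a1, a2, a3, a4, a5, a6]))).1
              n 0 <<< acc.2), acc.2 + 3)) ((0 : Int), (0 : Int))).1 := rfl
    _ = _ := by rw [key]; rfl

lemma orfold_last (A : List Int) (xs : List Int) (y b0 m0 : Int) :
    ((xs ++ [y]).foldl (fun (acc : Int × Int) n =>
        (PySem.Int.bor acc.1 (PySem.List.pyGetD A n 0 <<< acc.2), acc.2 + 3)) (b0, m0)).1
    = PySem.Int.bor
        ((xs.foldl (fun (acc : Int × Int) n =>
          (PySem.Int.bor acc.1 (PySem.List.pyGetD A n 0 <<< acc.2), acc.2 + 3)) (b0, m0)).1)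
        (PySem.List.pyGetD A y 0 <<< (m0 + 3 * xs.length)) := by
  rw [List.foldl_append]
  simp only [List.foldl]
  rw [snd_orfold]

lemma pvHashEq (c1 c2 c3 c4 c5 d : Int)
    (h1 : 0 ≤ c1 ∧ c1 < 7) (h2 : 0 ≤ c2 ∧ c2 < 7) (h3 : 0 ≤ c3 ∧ c3 < 7)
    (h4 : 0 ≤ c4 ∧ c4 < 7) (h5 : 0 ≤ c5 ∧ c5 < 7) (hd : 0 ≤ d ∧ d < 7) :
    encode [c1, c2, c3, c4, c5, d]
    = PySem.Int.bor
        ((PySem.List.enumerate [c1, c2, c3, c4, c5]).foldl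
          (fun b p => PySem.Int.bor b
            ((amBf [c1, c2, c3, c4, c5]).getD p.2 0 <<< (3 * p.1))) 0)
        ((amBf [c1, c2, c3, c4, c5]).getD d ((amBf [c1, c2, c3, c4, c5]).size : Int)
          <<< (15 : Int)) := by
  have hmem : ∀ v ∈ [c1, c2, c3, c4, c5], 0 ≤ v ∧ v < 7 := by
    intro v hv
    simp only [List.mem_cons, List.not_mem_nil, or_false] at hv
    rcases hv with rfl | rfl | rfl | rfl | rfl <;> assumption
  obtain ⟨hlen, hsz, hget, hpos⟩ := rel_amf [c1, c2, c3, c4, c5] hmem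
  have hcont : ∀ v ∈ [c1, c2, c3, c4, c5], (amBf [c1, c2, c3, c4, c5]).contains v = true :=
    fun v hv => contains_amBf_of_mem _ v hv PySem.Dict.empty
  -- labels of the prefix are already assigned, so processing d does not change them
  have hF2 : ∀ x ∈ [c1, c2, c3, c4, c5],
      PySem.List.pyGetD (stepA (amAf [c1, c2, c3, c4, c5]) d).1 x 0
      = PySem.List.pyGetD (amAf [c1, c2, c3, c4, c5]).1 x 0 := by
    intro x hx
    obtain ⟨hx0, hx7⟩ := hmem x hx
    unfold stepA
    by_cases hc : PySem.List.pyGetD (amAf [c1, c2, c3, c4, c5]).1 x 0 < 0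
    case neg =>
      split_ifs with hcd
      · rw [pyGetD_set _ _ _ _ hx0 (by omega) (by omega)]
        rw [if_neg ?_]
        intro hxd
        have : x = d := by omega
        subst this
        omega
      · rfl
    case pos =>
      exfalso
      have := hpos x (hcont x hx)
      rw [hget x hx0 hx7] at hc
      omega
  have hF3 : PySem.List.pyGetD (stepA (amAf [c1, c2, c3, c4, c5]) d).1 d 0
      = (amBf [c1, c2, c3, c4, c5]).getD d ((amBf [c1, c2, c3, c4, c5]).size : Int) := by
    unfold stepA
    split_ifs with hcd
    · rw [pyGetD_set _ _ _ _ hd.1 (by omega) (by omega), if_pos rfl]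
      have hnc : (amBf [c1, c2, c3, c4, c5]).contains d = false := by
        by_contra hcc
        have hcc' : (amBf [c1, c2, c3, c4, c5]).contains d = true := by
          simpa using hcc
        have := hpos d hcc'
        rw [hget d hd.1 hd.2] at hcd
        omega
      rw [PySem.Dict.getD_of_not_contains _ _ hnc]
      exact hsz
    · have hcc : (amBf [c1, c2, c3, c4, c5]).contains d = true := by
        by_contra hnc
        have hnc' : (amBf [c1, c2, c3, c4, c5]).contains d = false := by simpa using hnc
        rw [hget d hd.1 hd.2, PySem.Dict.getD_of_not_contains _ _ hnc'] at hcd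
        omega
      rw [hget d hd.1 hd.2]
      exact getD_irrel _ _ hcc _ _
  -- unfold encode into the or-fold over the final alphabet map
  rw [encode_structural,
      show [c1, c2, c3, c4, c5, d] = [c1, c2, c3, c4, c5] ++ [d] from rfl]
  have hAF : amAf ([c1, c2, c3, c4, c5] ++ [d]) = stepA (amAf [c1, c2, c3, c4, c5]) d := by
    unfold amAf
    rw [List.foldl_append]
    rfl
  rw [hAF, orfold_last]
  -- last-digit label
  rw [hF3]
  -- prefix part: swap to the prefix-only map, then to the dict fold
  have e1 := PySem.List.foldl_congr_mem [c1, c2, c3, c4, c5]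
    (fun (acc : Int × Int) n =>
      (PySem.Int.bor acc.1 (PySem.List.pyGetD (stepA (amAf [c1, c2, c3, c4, c5]) d).1 n 0 <<< acc.2),
       acc.2 + 3))
    (fun (acc : Int × Int) n =>
      (PySem.Int.bor acc.1 (PySem.List.pyGetD (amAf [c1, c2, c3, c4, c5]).1 n 0 <<< acc.2),
       acc.2 + 3))
    ((0 : Int), (0 : Int))
    (by intro acc x hx; simp only [hF2 x hx])
  rw [e1]
  have e2 := orfold_enum
    (fun n => PySem.List.pyGetD (amAf [c1, c2, c3, c4, c5]).1 n 0)
    (fun v => (amBf [c1, c2, c3, c4, c5]).getD v 0)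
    [c1, c2, c3, c4, c5]
    (by
      intro x hx
      obtain ⟨hx0, hx7⟩ := hmem x hx
      simp only []
      rw [hget x hx0 hx7]
      exact getD_irrel _ _ (hcont x hx) _ _)
    0 0
  rw [show (0 + 3 * (([c1, c2, c3, c4, c5] : List Int).length : Int)) = 15 by simp,
      show (((0 : Int), (0 : Int)) : Int × Int) = ((0 : Int), 3 * (0 : Int)) by norm_num,
      e2]

lemma band7_bounds (x : Int) : 0 ≤ PySem.Int.band x 7 ∧ PySem.Int.band x 7 ≤ 7 := by
  unfold PySem.Int.band
  split_ifs with hx hb hb <;> constructor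
  all_goals try positivity
  · have : x.toNat &&& (7:Int).toNat ≤ (7:Int).toNat := Nat.and_le_right
    omega
  · omega
  · have : (7:Int).toNat - ((7:Int).toNat &&& (-x - 1).toNat) ≤ (7:Int).toNat := Nat.sub_le _ _
    omega
  · omega
  · omega

lemma sr_step (h : Int) (a : Int) (ha : 0 ≤ a) : (h >>> a) >>> (3 : Int) = h >>> (a + 3) := by
  obtain ⟨m, rfl⟩ := Int.eq_ofNat_of_zero_le ha
  rw [show ((3:Int)) = ((3:Nat):Int) from rfl,
      Int.shiftRight_natCast_right, Int.shiftRight_natCast_right, ← Nat.cast_add,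
      Int.shiftRight_natCast_right]
  simp [Int.shiftRight_eq_div_pow, Int.ediv_ediv_of_nonneg, pow_add]

lemma shift0 (h : Int) : h >>> (0 : Int) = h := by
  rw [show ((0:Int)) = ((0:Nat):Int) from rfl, Int.shiftRight_natCast_right]
  simp

lemma decode_nested (x : Int) :
    decode x = [PySem.Int.band x 7, PySem.Int.band (x >>> (3:Int)) 7,
      PySem.Int.band ((x >>> (3:Int)) >>> (3:Int)) 7,
      PySem.Int.band (((x >>> (3:Int)) >>> (3:Int)) >>> (3:Int)) 7,
      PySem.Int.band ((((x >>> (3:Int)) >>> (3:Int)) >>> (3:Int)) >>> (3:Int)) 7,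
      PySem.Int.band (((((x >>> (3:Int)) >>> (3:Int)) >>> (3:Int)) >>> (3:Int)) >>> (3:Int)) 7] := rfl

lemma decode_flat (h : Int) :
    decode h = [PySem.Int.band h 7, PySem.Int.band (h >>> (3:Int)) 7,
      PySem.Int.band (h >>> (6:Int)) 7, PySem.Int.band (h >>> (9:Int)) 7,
      PySem.Int.band (h >>> (12:Int)) 7, PySem.Int.band (h >>> (15:Int)) 7] := by
  rw [decode_nested h, sr_step h 3 (by norm_num), sr_step h (3+3) (by norm_num),
      sr_step h (3+3+3) (by norm_num), sr_step h (3+3+3+3) (by norm_num)]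
  norm_num

lemma decode_flat3 (h : Int) :
    decode (h >>> (3:Int)) = [PySem.Int.band (h >>> (3:Int)) 7, PySem.Int.band (h >>> (6:Int)) 7,
      PySem.Int.band (h >>> (9:Int)) 7, PySem.Int.band (h >>> (12:Int)) 7,
      PySem.Int.band (h >>> (15:Int)) 7, PySem.Int.band (h >>> (18:Int)) 7] := by
  rw [decode_nested (h >>> (3:Int)), sr_step h 3 (by norm_num), sr_step h (3+3) (by norm_num),
      sr_step h (3+3+3) (by norm_num), sr_step h (3+3+3+3) (by norm_num),
      sr_step h (3+3+3+3+3) (by norm_num)]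
  norm_num

lemma chunks_flat (h : Int) :
    (PySem.List.pyRange 0 pvB_N 1).map (fun i => PySem.Int.band (h >>> (3 * i)) 7)
    = [PySem.Int.band (h >>> (0:Int)) 7, PySem.Int.band (h >>> (3:Int)) 7,
       PySem.Int.band (h >>> (6:Int)) 7, PySem.Int.band (h >>> (9:Int)) 7,
       PySem.Int.band (h >>> (12:Int)) 7, PySem.Int.band (h >>> (15:Int)) 7,
       PySem.Int.band (h >>> (18:Int)) 7] := rfl

lemma slice_pref (a0 a1 a2 a3 a4 a5 a6 : Int) :
    PySem.List.slice [a0, a1, a2, a3, a4, a5, a6] none (some pvB_L) = [a0, a1, a2, a3, a4, a5] := rfl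

lemma slice_mid (a0 a1 a2 a3 a4 a5 a6 : Int) :
    PySem.List.slice [a0, a1, a2, a3, a4, a5, a6] (some 1) (some pvB_L) = [a1, a2, a3, a4, a5] := rfl

theorem main_aux (h : Int)
    (p1 : PySem.Int.band (h >>> (3:Int)) 7 ≠ 7) (p2 : PySem.Int.band (h >>> (6:Int)) 7 ≠ 7)
    (p3 : PySem.Int.band (h >>> (9:Int)) 7 ≠ 7) (p4 : PySem.Int.band (h >>> (12:Int)) 7 ≠ 7)
    (p5 : PySem.Int.band (h >>> (15:Int)) 7 ≠ 7) :
    generate_next_states h = generate_next_states_alt h := by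
  have hb1 := band7_bounds (h >>> (3:Int))
  have hb2 := band7_bounds (h >>> (6:Int))
  have hb3 := band7_bounds (h >>> (9:Int))
  have hb4 := band7_bounds (h >>> (12:Int))
  have hb5 := band7_bounds (h >>> (15:Int))
  have hc1 : 0 ≤ PySem.Int.band (h >>> (3:Int)) 7 ∧ PySem.Int.band (h >>> (3:Int)) 7 < 7 :=
    ⟨hb1.1, lt_of_le_of_ne hb1.2 p1⟩
  have hc2 : 0 ≤ PySem.Int.band (h >>> (6:Int)) 7 ∧ PySem.Int.band (h >>> (6:Int)) 7 < 7 :=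
    ⟨hb2.1, lt_of_le_of_ne hb2.2 p2⟩
  have hc3 : 0 ≤ PySem.Int.band (h >>> (9:Int)) 7 ∧ PySem.Int.band (h >>> (9:Int)) 7 < 7 :=
    ⟨hb3.1, lt_of_le_of_ne hb3.2 p3⟩
  have hc4 : 0 ≤ PySem.Int.band (h >>> (12:Int)) 7 ∧ PySem.Int.band (h >>> (12:Int)) 7 < 7 :=
    ⟨hb4.1, lt_of_le_of_ne hb4.2 p4⟩
  have hc5 : 0 ≤ PySem.Int.band (h >>> (15:Int)) 7 ∧ PySem.Int.band (h >>> (15:Int)) 7 < 7 :=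
    ⟨hb5.1, lt_of_le_of_ne hb5.2 p5⟩
  simp only [generate_next_states, generate_next_states_alt]
  rw [decode_flat h, decode_flat3 h, chunks_flat h, shift0 h, slice_pref, slice_mid]
  set c0 := PySem.Int.band h 7 with hs0
  set c1 := PySem.Int.band (h >>> (3:Int)) 7 with hs1
  set c2 := PySem.Int.band (h >>> (6:Int)) 7 with hs2
  set c3 := PySem.Int.band (h >>> (9:Int)) 7 with hs3
  set c4 := PySem.Int.band (h >>> (12:Int)) 7 with hs4
  set c5 := PySem.Int.band (h >>> (15:Int)) 7 with hs5
  set c6 := PySem.Int.band (h >>> (18:Int)) 7 with hs6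
  rw [show (List.foldl (fun (m : PySem.Dict Int Int) v =>
        if (!m.contains v) = true then m.insert v (m.size : Int) else m)
        PySem.Dict.empty [c1, c2, c3, c4, c5]) = amBf [c1, c2, c3, c4, c5] from rfl,
      show pvA_N - 1 = (6:Int) from rfl, show pvB_N - 1 = (6:Int) from rfl,
      show (3 * (pvB_L - 1) : Int) = (15:Int) from rfl,
      show pvA_N = (7:Int) from rfl, show pvB_N = (7:Int) from rfl]
  rw [loopA (PySem.List.pyRange 0 7 1)
      (fun d => ((List.length (PySem.Set.ofList [c0, c1, c2, c3, c4, c5]) : Int) = 6 ∧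
        d ∉ [c0, c1, c2, c3, c4, c5])) c1 c2 c3 c4 c5 c6 PySem.Dict.empty]
  have hx := PySem.List.foldl_congr_mem (PySem.List.pyRange 0 7 1)
    (fun (acc : PySem.Dict Int Int) d =>
      if ((List.length (PySem.Set.ofList [c0, c1, c2, c3, c4, c5]) : Int) = 6 ∧
          d ∉ [c0, c1, c2, c3, c4, c5]) then acc
      else acc.modify (encode [c1, c2, c3, c4, c5, d]) (0 : Int) (· + 1))
    (fun (acc : PySem.Dict Int Int) d =>
      if ((List.length (PySem.Set.ofList [c0, c1, c2, c3, c4, c5]) : Int) = 6 ∧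
          d ∉ [c0, c1, c2, c3, c4, c5]) then acc
      else acc.modify
        (PySem.Int.bor
          ((PySem.List.enumerate [c1, c2, c3, c4, c5]).foldl
            (fun b p => PySem.Int.bor b ((amBf [c1, c2, c3, c4, c5]).getD p.2 0 <<< (3 * p.1))) 0)
          ((amBf [c1, c2, c3, c4, c5]).getD d ((amBf [c1, c2, c3, c4, c5]).size : Int) <<< (15 : Int)))
        (0 : Int) (· + 1))
    PySem.Dict.empty
    (by
      intro acc d hd
      have hdb := PySem.List.mem_pyRange_one.mp hd
      simp only [pvHashEq c1 c2 c3 c4 c5 d hc1 hc2 hc3 hc4 hc5 ⟨hdb.1, hdb.2⟩])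
  rw [hx,
      counters_eq
        (fun d => ((List.length (PySem.Set.ofList [c0, c1, c2, c3, c4, c5]) : Int) = 6 ∧
          d ∉ [c0, c1, c2, c3, c4, c5]))
        (fun d =>
          PySem.Int.bor
            ((PySem.List.enumerate [c1, c2, c3, c4, c5]).foldl
              (fun b p => PySem.Int.bor b ((amBf [c1, c2, c3, c4, c5]).getD p.2 0 <<< (3 * p.1))) 0)
            ((amBf [c1, c2, c3, c4, c5]).getD d ((amBf [c1, c2, c3, c4, c5]).size : Int) <<< (15 : Int)))
        (PySem.List.pyRange 0 7 1)]

-- ===== VERDICT (by name: the statement is the Claim_ definition above) =====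
theorem generate_next_states_spec : Claim_equal_generate_next_states := by
  intro h _ hpre
  obtain ⟨p1, p2, p3, p4, p5⟩ := hpre
  exact main_aux h p1 p2 p3 p4 p5
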